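-- pv_equiv track=rewrite | github.com/Adrien-Amour/adriq | adriq/ad9910.py | cfr1_bytes
-- ===== SOURCE A (Python) =====
-- def cfr1_bytes(
--     RAM_Enable=False, RAM_Mode='00', Inverse_Sinc_Filter_Enable=False, Internal_Profile='0000', Sin=False,
--     Manual_OSK_External_Control=False,
--     Autoclear_Digital_Ramp_Accumulator=False, Autoclear_Phase_Accumulator=False,
--     Clear_Digital_Ramp_Accumulator=False, Clear_Phase_Accumulator=False,
--     Load_LRR_At_IO_Update=False, Load_ARR_At_IO_Update=False, OSK_Enable=False,
--     REF_CLK_Input_Power_Down=False, DAC_Power_Down=False, Select_Auto_OSK = False, Digital_Power_Down=False,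
--     Aux_DAC_Power_Down = False, External_Power_Down_Control=False, SDIO_Input_Only=True):
--
--     bits = [0] * 32  # Initialize a 32-bit list with all bits set to 0
--
--     # Setting bits based on the input parameters
--     bits[31] = 1 if RAM_Enable else 0
--     bits[30], bits[29] = int(RAM_Mode[1]), int(RAM_Mode[0])
--     bits[23] = 1 if Manual_OSK_External_Control else 0
--     bits[22] = 1 if Inverse_Sinc_Filter_Enable else 0
--     bits[21] = 0 #open
--     bits[17:21] = [int(Internal_Profile[3-i]) for i in range(4)]  # Bits 20-17: Internal Profile (reversed order because of numbering conventions)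
--     bits[16] = 1 if Sin else 0
--     bits[15] = 1 if Load_LRR_At_IO_Update else 0
--     bits[14] = 1 if Autoclear_Digital_Ramp_Accumulator else 0
--     bits[13] = 1 if Autoclear_Phase_Accumulator else 0
--     bits[12] = 1 if Clear_Digital_Ramp_Accumulator else 0
--     bits[11] = 1 if Clear_Phase_Accumulator else 0
--     bits[10] = 1 if Load_ARR_At_IO_Update else 0
--     bits[9] = 1 if OSK_Enable else 0
--     bits[8] = 1 if Select_Auto_OSK else 0
--     bits[7] = 1 if Digital_Power_Down else 0
--     bits[6] = 1 if DAC_Power_Down else 0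
--     bits[5] = 1 if REF_CLK_Input_Power_Down else 0
--     bits[4] = 1 if Aux_DAC_Power_Down else 0
--     bits[3] = 1 if External_Power_Down_Control else 0
--     bits[2] = 0 #OPEN
--     bits[1] = 1 if SDIO_Input_Only else 0
--     bits[0] = 0 #always LSB last
--     bitstring = bits[::-1] # reverse the inputs to get the desired bitstring (bit ordering convention is the opposite to string ordering)
--     # Convert the bits list to a single string of bits
--     bitstring = ''.join(map(str, bitstring))
--
--
--     # Convert the bits to four bytes
--     byte1 = int(bitstring[0:8], 2)
--     byte2 = int(bitstring[8:16], 2)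
--     byte3 = int(bitstring[16:24], 2)
--     byte4 = int(bitstring[24:32], 2)
--
--     return [byte1, byte2, byte3, byte4]
-- ===== SOURCE B (Python) =====
-- # B: pack the flags straight into one 32-bit integer (each flag OR-ed/added at its
-- # bit position, string fields read char-by-char) and emit the four bytes with
-- # int.to_bytes -- no 32-element bit list, no string join, no binary re-parse.
-- def cfr1_bytes(
--     RAM_Enable=False, RAM_Mode='00', Inverse_Sinc_Filter_Enable=False, Internal_Profile='0000', Sin=False,
--     Manual_OSK_External_Control=False,
--     Autoclear_Digital_Ramp_Accumulator=False, Autoclear_Phase_Accumulator=False,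
--     Clear_Digital_Ramp_Accumulator=False, Clear_Phase_Accumulator=False,
--     Load_LRR_At_IO_Update=False, Load_ARR_At_IO_Update=False, OSK_Enable=False,
--     REF_CLK_Input_Power_Down=False, DAC_Power_Down=False, Select_Auto_OSK=False, Digital_Power_Down=False,
--     Aux_DAC_Power_Down=False, External_Power_Down_Control=False, SDIO_Input_Only=True):
--
--     v = ((1 if RAM_Enable else 0) << 31) \
--       + (int(RAM_Mode[1]) << 30) \
--       + (int(RAM_Mode[0]) << 29) \
--       + ((1 if Manual_OSK_External_Control else 0) << 23) \
--       + ((1 if Inverse_Sinc_Filter_Enable else 0) << 22) \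
--       + (int(Internal_Profile[0]) << 20) \
--       + (int(Internal_Profile[1]) << 19) \
--       + (int(Internal_Profile[2]) << 18) \
--       + (int(Internal_Profile[3]) << 17) \
--       + ((1 if Sin else 0) << 16) \
--       + ((1 if Load_LRR_At_IO_Update else 0) << 15) \
--       + ((1 if Autoclear_Digital_Ramp_Accumulator else 0) << 14) \
--       + ((1 if Autoclear_Phase_Accumulator else 0) << 13) \
--       + ((1 if Clear_Digital_Ramp_Accumulator else 0) << 12) \
--       + ((1 if Clear_Phase_Accumulator else 0) << 11) \
--       + ((1 if Load_ARR_At_IO_Update else 0) << 10) \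
--       + ((1 if OSK_Enable else 0) << 9) \
--       + ((1 if Select_Auto_OSK else 0) << 8) \
--       + ((1 if Digital_Power_Down else 0) << 7) \
--       + ((1 if DAC_Power_Down else 0) << 6) \
--       + ((1 if REF_CLK_Input_Power_Down else 0) << 5) \
--       + ((1 if Aux_DAC_Power_Down else 0) << 4) \
--       + ((1 if External_Power_Down_Control else 0) << 3) \
--       + ((1 if SDIO_Input_Only else 0) << 1)
--     return list(v.to_bytes(4, 'big'))
-- ===== Notes on version B (the rewrite author's own statement) =====
-- stated objective: idiomatic
-- what changed: Replaces the 32-element bit list, list reversal, string join and four base-2 string re-parses with a single 32-bit integer built by shifting each flag (and each string-field digit) into its bit position, read out as four big-endian bytes with int.to_bytes.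
import Mathlib
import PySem

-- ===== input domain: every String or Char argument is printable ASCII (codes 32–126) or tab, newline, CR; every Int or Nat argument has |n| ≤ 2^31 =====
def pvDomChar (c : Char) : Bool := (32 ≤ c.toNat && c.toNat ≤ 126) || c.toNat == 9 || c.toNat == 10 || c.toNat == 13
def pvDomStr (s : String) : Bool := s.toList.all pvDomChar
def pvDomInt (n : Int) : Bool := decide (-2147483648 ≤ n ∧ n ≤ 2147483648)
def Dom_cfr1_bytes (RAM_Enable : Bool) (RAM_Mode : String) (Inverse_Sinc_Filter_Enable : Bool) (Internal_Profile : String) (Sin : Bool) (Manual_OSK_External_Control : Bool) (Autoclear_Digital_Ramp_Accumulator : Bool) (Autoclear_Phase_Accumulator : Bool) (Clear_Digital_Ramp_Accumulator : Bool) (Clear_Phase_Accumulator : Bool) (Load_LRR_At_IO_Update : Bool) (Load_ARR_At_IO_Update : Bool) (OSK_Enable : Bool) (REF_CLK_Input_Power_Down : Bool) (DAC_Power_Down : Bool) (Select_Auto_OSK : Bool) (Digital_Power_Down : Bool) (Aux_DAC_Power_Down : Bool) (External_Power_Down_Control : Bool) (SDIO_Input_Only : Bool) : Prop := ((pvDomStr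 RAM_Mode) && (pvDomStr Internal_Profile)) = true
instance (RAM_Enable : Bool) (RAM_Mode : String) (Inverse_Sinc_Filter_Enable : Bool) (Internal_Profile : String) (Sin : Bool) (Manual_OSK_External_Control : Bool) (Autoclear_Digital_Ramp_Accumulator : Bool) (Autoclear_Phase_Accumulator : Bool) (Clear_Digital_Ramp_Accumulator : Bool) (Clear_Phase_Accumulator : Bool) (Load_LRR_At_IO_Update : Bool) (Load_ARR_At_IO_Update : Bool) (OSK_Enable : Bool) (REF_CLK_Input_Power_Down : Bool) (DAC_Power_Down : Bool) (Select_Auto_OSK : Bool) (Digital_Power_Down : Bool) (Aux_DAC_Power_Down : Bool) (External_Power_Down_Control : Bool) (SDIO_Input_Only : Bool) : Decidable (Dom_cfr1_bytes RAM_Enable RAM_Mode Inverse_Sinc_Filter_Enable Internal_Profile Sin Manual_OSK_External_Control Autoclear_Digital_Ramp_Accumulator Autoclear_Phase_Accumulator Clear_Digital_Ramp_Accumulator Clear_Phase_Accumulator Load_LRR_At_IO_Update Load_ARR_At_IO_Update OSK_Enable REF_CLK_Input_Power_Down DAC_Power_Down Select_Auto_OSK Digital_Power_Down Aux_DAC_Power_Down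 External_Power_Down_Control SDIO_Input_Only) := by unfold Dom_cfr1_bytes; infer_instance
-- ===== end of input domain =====

-- B replaces A's 32-element bit list + reversal + string join + four base-2 re-parses by
-- packing the flags into one 32-bit integer and reading off its four big-endian bytes (idiomatic).
-- B replaces A's 32-element bit list + reversal + string join + four base-2 re-parses by
-- packing the flags into one 32-bit integer and reading off its four big-endian bytes (idiomatic).
-- B replaces A's 32-element bit list + reversal + string join + four base-2 re-parses by
-- packing the flags into one 32-bit integer and reading off its four big-endian bytes (idiomatic).
-- B replaces A's 32-element bit list + reversal + string join + four base-2 re-parses by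
-- packing the flags into one 32-bit integer and reading off its four big-endian bytes (idiomatic).
-- B replaces A's 32-element bit list + reversal + string join + four base-2 re-parses by
-- packing the flags into one 32-bit integer and reading off its four big-endian bytes (idiomatic).
-- B replaces A's 32-element bit list + reversal + string join + four base-2 re-parses by
-- packing the flags into one 32-bit integer and reading off its four big-endian bytes (idiomatic).
-- B replaces A's 32-element bit list + reversal + string join + four base-2 re-parses by
-- packing the flags into one 32-bit integer and reading off its four big-endian bytes (idiomatic).
-- B replaces A's 32-element bit list + reversal + string join + four base-2 re-parses by
-- packing the flags into one 32-bit integer and reading off its four big-endian bytes (idiomatic).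
-- B replaces A's 32-element bit list + reversal + string join + four base-2 re-parses by
-- packing the flags into one 32-bit integer and reading off its four big-endian bytes (idiomatic).
-- B replaces A's 32-element bit list + reversal + string join + four base-2 re-parses by
-- packing the flags into one 32-bit integer and reading off its four big-endian bytes (idiomatic).
-- B replaces A's 32-element bit list + reversal + string join + four base-2 re-parses by
-- packing the flags into one 32-bit integer and reading off its four big-endian bytes (idiomatic).
-- B replaces A's 32-element bit list + reversal + string join + four base-2 re-parses by
-- packing the flags into one 32-bit integer and reading off its four big-endian bytes (idiomatic).
-- B replaces A's 32-element bit list + reversal + string join + four base-2 re-parses by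
-- packing the flags into one 32-bit integer and reading off its four big-endian bytes (idiomatic).
-- B replaces A's 32-element bit list + reversal + string join + four base-2 re-parses by
-- packing the flags into one 32-bit integer and reading off its four big-endian bytes (idiomatic).


-- ===== PORT A =====
-- int(s[i]) in total form: exact whenever Pre_ holds (index in range, char a digit '0'/'1');
-- shared by both ports (both Pythons read the string fields with int(s[i])).
def pvIntAt (s : String) (i : Int) : Int :=
  ((PySem.Str.pyGet? s i).bind (fun c => PySem.Int.ofStr? (String.ofList [c]))).getD 0

def cfr1_bytes (RAM_Enable : Bool) (RAM_Mode : String) (Inverse_Sinc_Filter_Enable : Bool) (Internal_Profile : String) (Sin : Bool) (Manual_OSK_External_Control : Bool) (Autoclear_Digital_Ramp_Accumulator : Bool) (Autoclear_Phase_Accumulator : Bool) (Clear_Digital_Ramp_Accumulator : Bool) (Clear_Phase_Accumulator : Bool) (Load_LRR_At_IO_Update : Bool) (Load_ARR_At_IO_Update : Bool) (OSK_Enable : Bool) (REF_CLK_Input_Power_Down : Bool) (DAC_Power_Down : Bool) (Select_Auto_OSK : Bool) (Digital_Power_Down : Bool) (Aux_DAC_Power_Down : Bool) (External_Power_Down_Control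 : Bool) (SDIO_Input_Only : Bool) : List Int :=
  let bits : List Int := List.replicate 32 0
  let bits := bits.set 31 (if RAM_Enable then 1 else 0)
  let bits := bits.set 30 (pvIntAt RAM_Mode 1)
  let bits := bits.set 29 (pvIntAt RAM_Mode 0)
  let bits := bits.set 23 (if Manual_OSK_External_Control then 1 else 0)
  let bits := bits.set 22 (if Inverse_Sinc_Filter_Enable then 1 else 0)
  let bits := bits.set 21 0
  -- bits[17:21] = [int(Internal_Profile[3-i]) for i in range(4)] : slice assignment with
  -- literal in-range bounds 17 ≤ 21 ≤ len(bits) is take/splice/drop (exact)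
  let bits := bits.take 17 ++ (PySem.List.pyRange 0 4 1).map (fun i => pvIntAt Internal_Profile (3 - i)) ++ bits.drop 21
  let bits := bits.set 16 (if Sin then 1 else 0)
  let bits := bits.set 15 (if Load_LRR_At_IO_Update then 1 else 0)
  let bits := bits.set 14 (if Autoclear_Digital_Ramp_Accumulator then 1 else 0)
  let bits := bits.set 13 (if Autoclear_Phase_Accumulator then 1 else 0)
  let bits := bits.set 12 (if Clear_Digital_Ramp_Accumulator then 1 else 0)
  let bits := bits.set 11 (if Clear_Phase_Accumulator then 1 else 0)
  let bits := bits.set 10 (if Load_ARR_At_IO_Update then 1 else 0)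
  let bits := bits.set 9 (if OSK_Enable then 1 else 0)
  let bits := bits.set 8 (if Select_Auto_OSK then 1 else 0)
  let bits := bits.set 7 (if Digital_Power_Down then 1 else 0)
  let bits := bits.set 6 (if DAC_Power_Down then 1 else 0)
  let bits := bits.set 5 (if REF_CLK_Input_Power_Down then 1 else 0)
  let bits := bits.set 4 (if Aux_DAC_Power_Down then 1 else 0)
  let bits := bits.set 3 (if External_Power_Down_Control then 1 else 0)
  let bits := bits.set 2 0
  let bits := bits.set 1 (if SDIO_Input_Only then 1 else 0)
  let bits := bits.set 0 0
  let bitstring := (PySem.List.slice? bits none none (-1)).getD []   -- bits[::-1] (step ≠ 0, never none)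
  let bitstring := PySem.Str.join "" (bitstring.map PySem.Int.toStr) -- ''.join(map(str, bitstring))
  -- int(s, 2) on each 8-char slice; total form exact under Pre_ (every char is '0'/'1', so no ValueError)
  let byte1 := (PySem.Int.ofCharsBase? (PySem.Str.slice bitstring (some 0) (some 8)).toList 2).getD 0
  let byte2 := (PySem.Int.ofCharsBase? (PySem.Str.slice bitstring (some 8) (some 16)).toList 2).getD 0
  let byte3 := (PySem.Int.ofCharsBase? (PySem.Str.slice bitstring (some 16) (some 24)).toList 2).getD 0
  let byte4 := (PySem.Int.ofCharsBase? (PySem.Str.slice bitstring (some 24) (some 32)).toList 2).getD 0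
  [byte1, byte2, byte3, byte4]

-- ===== PORT B =====
def cfr1_bytes_alt (RAM_Enable : Bool) (RAM_Mode : String) (Inverse_Sinc_Filter_Enable : Bool) (Internal_Profile : String) (Sin : Bool) (Manual_OSK_External_Control : Bool) (Autoclear_Digital_Ramp_Accumulator : Bool) (Autoclear_Phase_Accumulator : Bool) (Clear_Digital_Ramp_Accumulator : Bool) (Clear_Phase_Accumulator : Bool) (Load_LRR_At_IO_Update : Bool) (Load_ARR_At_IO_Update : Bool) (OSK_Enable : Bool) (REF_CLK_Input_Power_Down : Bool) (DAC_Power_Down : Bool) (Select_Auto_OSK : Bool) (Digital_Power_Down : Bool) (Aux_DAC_Power_Down : Bool) (External_Power_Down_Control : Bool) (SDIO_Input_Only : Bool) : List Int :=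
  -- each `flag << k` / `int(s[i]) << k`: n << k on nonnegative n is n * 2^k (exact)
  let v : Int :=
      (if RAM_Enable then 1 else 0) * 2 ^ 31
    + pvIntAt RAM_Mode 1 * 2 ^ 30
    + pvIntAt RAM_Mode 0 * 2 ^ 29
    + (if Manual_OSK_External_Control then 1 else 0) * 2 ^ 23
    + (if Inverse_Sinc_Filter_Enable then 1 else 0) * 2 ^ 22
    + pvIntAt Internal_Profile 0 * 2 ^ 20
    + pvIntAt Internal_Profile 1 * 2 ^ 19
    + pvIntAt Internal_Profile 2 * 2 ^ 18
    + pvIntAt Internal_Profile 3 * 2 ^ 17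
    + (if Sin then 1 else 0) * 2 ^ 16
    + (if Load_LRR_At_IO_Update then 1 else 0) * 2 ^ 15
    + (if Autoclear_Digital_Ramp_Accumulator then 1 else 0) * 2 ^ 14
    + (if Autoclear_Phase_Accumulator then 1 else 0) * 2 ^ 13
    + (if Clear_Digital_Ramp_Accumulator then 1 else 0) * 2 ^ 12
    + (if Clear_Phase_Accumulator then 1 else 0) * 2 ^ 11
    + (if Load_ARR_At_IO_Update then 1 else 0) * 2 ^ 10
    + (if OSK_Enable then 1 else 0) * 2 ^ 9
    + (if Select_Auto_OSK then 1 else 0) * 2 ^ 8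
    + (if Digital_Power_Down then 1 else 0) * 2 ^ 7
    + (if DAC_Power_Down then 1 else 0) * 2 ^ 6
    + (if REF_CLK_Input_Power_Down then 1 else 0) * 2 ^ 5
    + (if Aux_DAC_Power_Down then 1 else 0) * 2 ^ 4
    + (if External_Power_Down_Control then 1 else 0) * 2 ^ 3
    + (if SDIO_Input_Only then 1 else 0) * 2 ^ 1
  -- list(v.to_bytes(4, 'big')) for 0 ≤ v < 2^32 (guaranteed under Pre_): the four
  -- big-endian base-256 digits, Python // and % on nonnegative values
  [PySem.Int.mod (PySem.Int.floordiv v (2 ^ 24)) 256,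
   PySem.Int.mod (PySem.Int.floordiv v (2 ^ 16)) 256,
   PySem.Int.mod (PySem.Int.floordiv v (2 ^ 8)) 256,
   PySem.Int.mod v 256]

-- ===== PRECONDITION & SPEC =====
-- Pre_ is exactly the set of inputs on which the Python A returns: RAM_Mode needs at least 2 and
-- Internal_Profile at least 4 characters (else IndexError) and each consumed character must be
-- '0' or '1' (any other char raises ValueError, at int(c) or at the final base-2 parse).
def Pre_cfr1_bytes (RAM_Enable : Bool) (RAM_Mode : String) (Inverse_Sinc_Filter_Enable : Bool) (Internal_Profile : String) (Sin : Bool) (Manual_OSK_External_Control : Bool) (Autoclear_Digital_Ramp_Accumulator : Bool) (Autoclear_Phase_Accumulator : Bool) (Clear_Digital_Ramp_Accumulator : Bool) (Clear_Phase_Accumulator : Bool) (Load_LRR_At_IO_Update : Bool) (Load_ARR_At_IO_Update : Bool) (OSK_Enable : Bool) (REF_CLK_Input_Power_Down : Bool) (DAC_Power_Down : Bool) (Select_Auto_OSK : Bool) (Digital_Power_Down : Bool) (Aux_DAC_Power_Down : Bool) (External_Power_Down_Control : Bool) (SDIO_Input_Only : Bool) : Prop :=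
  2 ≤ RAM_Mode.toList.length ∧
  (RAM_Mode.toList.getD 0 ' ' = '0' ∨ RAM_Mode.toList.getD 0 ' ' = '1') ∧
  (RAM_Mode.toList.getD 1 ' ' = '0' ∨ RAM_Mode.toList.getD 1 ' ' = '1') ∧
  4 ≤ Internal_Profile.toList.length ∧
  (Internal_Profile.toList.getD 0 ' ' = '0' ∨ Internal_Profile.toList.getD 0 ' ' = '1') ∧
  (Internal_Profile.toList.getD 1 ' ' = '0' ∨ Internal_Profile.toList.getD 1 ' ' = '1') ∧
  (Internal_Profile.toList.getD 2 ' ' = '0' ∨ Internal_Profile.toList.getD 2 ' ' = '1') ∧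
  (Internal_Profile.toList.getD 3 ' ' = '0' ∨ Internal_Profile.toList.getD 3 ' ' = '1')

instance (RAM_Enable : Bool) (RAM_Mode : String) (Inverse_Sinc_Filter_Enable : Bool) (Internal_Profile : String) (Sin : Bool) (Manual_OSK_External_Control : Bool) (Autoclear_Digital_Ramp_Accumulator : Bool) (Autoclear_Phase_Accumulator : Bool) (Clear_Digital_Ramp_Accumulator : Bool) (Clear_Phase_Accumulator : Bool) (Load_LRR_At_IO_Update : Bool) (Load_ARR_At_IO_Update : Bool) (OSK_Enable : Bool) (REF_CLK_Input_Power_Down : Bool) (DAC_Power_Down : Bool) (Select_Auto_OSK : Bool) (Digital_Power_Down : Bool) (Aux_DAC_Power_Down : Bool) (External_Power_Down_Control : Bool) (SDIO_Input_Only : Bool) : Decidable (Pre_cfr1_bytes RAM_Enable RAM_Mode Inverse_Sinc_Filter_Enable Internal_Profile Sin Manual_OSK_External_Control Autoclear_Digital_Ramp_Accumulator Autoclear_Phase_Accumulator Clear_Digital_Ramp_Accumulator Clear_Phase_Accumulator Load_LRR_At_IO_Update Load_ARR_At_IO_Update OSK_Enable REF_CLK_Input_Power_Down DAC_Power_Down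 Select_Auto_OSK Digital_Power_Down Aux_DAC_Power_Down External_Power_Down_Control SDIO_Input_Only) := by unfold Pre_cfr1_bytes; infer_instance

def pvWitness_cfr1_bytes : Bool × String × Bool × String × Bool × Bool × Bool × Bool × Bool × Bool × Bool × Bool × Bool × Bool × Bool × Bool × Bool × Bool × Bool × Bool :=
  (false, "00", false, "0000", false, false, false, false, false, false, false, false, false, false, false, false, false, false, false, true)

def Spec_cfr1_bytes (RAM_Enable : Bool) (RAM_Mode : String) (Inverse_Sinc_Filter_Enable : Bool) (Internal_Profile : String) (Sin : Bool) (Manual_OSK_External_Control : Bool) (Autoclear_Digital_Ramp_Accumulator : Bool) (Autoclear_Phase_Accumulator : Bool) (Clear_Digital_Ramp_Accumulator : Bool) (Clear_Phase_Accumulator : Bool) (Load_LRR_At_IO_Update : Bool) (Load_ARR_At_IO_Update : Bool) (OSK_Enable : Bool) (REF_CLK_Input_Power_Down : Bool) (DAC_Power_Down : Bool) (Select_Auto_OSK : Bool) (Digital_Power_Down : Bool) (Aux_DAC_Power_Down : Bool) (External_Power_Down_Control : Bool) (SDIO_Input_Only : Bool) (out : List Int) : Prop := out = cfr1_bytes_alt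 RAM_Enable RAM_Mode Inverse_Sinc_Filter_Enable Internal_Profile Sin Manual_OSK_External_Control Autoclear_Digital_Ramp_Accumulator Autoclear_Phase_Accumulator Clear_Digital_Ramp_Accumulator Clear_Phase_Accumulator Load_LRR_At_IO_Update Load_ARR_At_IO_Update OSK_Enable REF_CLK_Input_Power_Down DAC_Power_Down Select_Auto_OSK Digital_Power_Down Aux_DAC_Power_Down External_Power_Down_Control SDIO_Input_Only
instance (RAM_Enable : Bool) (RAM_Mode : String) (Inverse_Sinc_Filter_Enable : Bool) (Internal_Profile : String) (Sin : Bool) (Manual_OSK_External_Control : Bool) (Autoclear_Digital_Ramp_Accumulator : Bool) (Autoclear_Phase_Accumulator : Bool) (Clear_Digital_Ramp_Accumulator : Bool) (Clear_Phase_Accumulator : Bool) (Load_LRR_At_IO_Update : Bool) (Load_ARR_At_IO_Update : Bool) (OSK_Enable : Bool) (REF_CLK_Input_Power_Down : Bool) (DAC_Power_Down : Bool) (Select_Auto_OSK : Bool) (Digital_Power_Down : Bool) (Aux_DAC_Power_Down : Bool) (External_Power_Down_Control : Bool) (SDIO_Input_Only : Bool) (out : List Int) : Decidable (Spec_cfr1_bytes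 RAM_Enable RAM_Mode Inverse_Sinc_Filter_Enable Internal_Profile Sin Manual_OSK_External_Control Autoclear_Digital_Ramp_Accumulator Autoclear_Phase_Accumulator Clear_Digital_Ramp_Accumulator Clear_Phase_Accumulator Load_LRR_At_IO_Update Load_ARR_At_IO_Update OSK_Enable REF_CLK_Input_Power_Down DAC_Power_Down Select_Auto_OSK Digital_Power_Down Aux_DAC_Power_Down External_Power_Down_Control SDIO_Input_Only out) := by unfold Spec_cfr1_bytes; infer_instance

-- ===== CLAIM (what is proved, stated in full; the proofs are below) =====
def Claim_equal_cfr1_bytes : Prop := ∀ (RAM_Enable : Bool) (RAM_Mode : String) (Inverse_Sinc_Filter_Enable : Bool) (Internal_Profile : String) (Sin : Bool) (Manual_OSK_External_Control : Bool) (Autoclear_Digital_Ramp_Accumulator : Bool) (Autoclear_Phase_Accumulator : Bool) (Clear_Digital_Ramp_Accumulator : Bool) (Clear_Phase_Accumulator : Bool) (Load_LRR_At_IO_Update : Bool) (Load_ARR_At_IO_Update : Bool) (OSK_Enable : Bool) (REF_CLK_Input_Power_Down : Bool) (DAC_Power_Down : Bool) (Select_Auto_OSK : Bool) (Digital_Power_Down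 : Bool) (Aux_DAC_Power_Down : Bool) (External_Power_Down_Control : Bool) (SDIO_Input_Only : Bool), Dom_cfr1_bytes RAM_Enable RAM_Mode Inverse_Sinc_Filter_Enable Internal_Profile Sin Manual_OSK_External_Control Autoclear_Digital_Ramp_Accumulator Autoclear_Phase_Accumulator Clear_Digital_Ramp_Accumulator Clear_Phase_Accumulator Load_LRR_At_IO_Update Load_ARR_At_IO_Update OSK_Enable REF_CLK_Input_Power_Down DAC_Power_Down Select_Auto_OSK Digital_Power_Down Aux_DAC_Power_Down External_Power_Down_Control SDIO_Input_Only → Pre_cfr1_bytes RAM_Enable RAM_Mode Inverse_Sinc_Filter_Enable Internal_Profile Sin Manual_OSK_External_Control Autoclear_Digital_Ramp_Accumulator Autoclear_Phase_Accumulator Clear_Digital_Ramp_Accumulator Clear_Phase_Accumulator Load_LRR_At_IO_Update Load_ARR_At_IO_Update OSK_Enable REF_CLK_Input_Power_Down DAC_Power_Down Select_Auto_OSK Digital_Power_Down Aux_DAC_Power_Down External_Power_Down_Control SDIO_Input_Only → Spec_cfr1_bytes RAM_Enable RAM_Mode Inverse_Sinc_Filter_Enable Internal_Profile Sin Manual_OSK_External_Control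 Autoclear_Digital_Ramp_Accumulator Autoclear_Phase_Accumulator Clear_Digital_Ramp_Accumulator Clear_Phase_Accumulator Load_LRR_At_IO_Update Load_ARR_At_IO_Update OSK_Enable REF_CLK_Input_Power_Down DAC_Power_Down Select_Auto_OSK Digital_Power_Down Aux_DAC_Power_Down External_Power_Down_Control SDIO_Input_Only (cfr1_bytes RAM_Enable RAM_Mode Inverse_Sinc_Filter_Enable Internal_Profile Sin Manual_OSK_External_Control Autoclear_Digital_Ramp_Accumulator Autoclear_Phase_Accumulator Clear_Digital_Ramp_Accumulator Clear_Phase_Accumulator Load_LRR_At_IO_Update Load_ARR_At_IO_Update OSK_Enable REF_CLK_Input_Power_Down DAC_Power_Down Select_Auto_OSK Digital_Power_Down Aux_DAC_Power_Down External_Power_Down_Control SDIO_Input_Only)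

-- ===== LEMMAS AND PROOFS =====
lemma pvToStr_if (b : Bool) :
    PySem.Int.toStr (if b then (1:Int) else 0) = String.ofList [if b then '1' else '0'] := by
  cases b <;> rfl

lemma pvToStr_bit (y : Int) (h : y = 0 ∨ y = 1) :
    PySem.Int.toStr y = String.ofList [if y = 1 then '1' else '0'] := by
  rcases h with rfl | rfl <;> rfl

lemma pvToStr_zero : PySem.Int.toStr (0:Int) = String.ofList ['0'] := rfl

lemma pvIntAt_bit (s : String) (i : Int) (c : Char)
    (h : PySem.Str.pyGet? s i = some c) (hb : c = '0' ∨ c = '1') :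
    pvIntAt s i = if c = '1' then 1 else 0 := by
  rcases hb with rfl | rfl <;> simp only [pvIntAt, h, Option.bind_some] <;> decide

lemma pvJoin32 (a31 a30 a29 a28 a27 a26 a25 a24 a23 a22 a21 a20 a19 a18 a17 a16 a15 a14 a13 a12 a11 a10 a9 a8 a7 a6 a5 a4 a3 a2 a1 a0 : Char) :
    (PySem.Str.join "" [String.ofList [a31], String.ofList [a30], String.ofList [a29], String.ofList [a28], String.ofList [a27], String.ofList [a26], String.ofList [a25], String.ofList [a24], String.ofList [a23], String.ofList [a22], String.ofList [a21], String.ofList [a20], String.ofList [a19], String.ofList [a18], String.ofList [a17], String.ofList [a16], String.ofList [a15], String.ofList [a14], String.ofList [a13], String.ofList [a12], String.ofList [a11], String.ofList [a10], String.ofList [a9], String.ofList [a8], String.ofList [a7], String.ofList [a6], String.ofList [a5], String.ofList [a4], String.ofList [a3], String.ofList [a2], String.ofList [a1], String.ofList [a0]]).toList = [a31, a30, a29, a28, a27, a26, a25, a24, a23, a22, a21, a20, a19, a18, a17, a16, a15, a14, a13, a12, a11, a10, a9, a8, a7, a6, a5, a4, a3, a2, a1, a0] := by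
  simp only [PySem.Str.toList_join, List.map_cons, List.map_nil, String.toList_ofList,
    String.toList_empty]
  rfl

lemma pvSlice32_1 (a31 a30 a29 a28 a27 a26 a25 a24 a23 a22 a21 a20 a19 a18 a17 a16 a15 a14 a13 a12 a11 a10 a9 a8 a7 a6 a5 a4 a3 a2 a1 a0 : Char) :
    PySem.List.slice [a31, a30, a29, a28, a27, a26, a25, a24, a23, a22, a21, a20, a19, a18, a17, a16, a15, a14, a13, a12, a11, a10, a9, a8, a7, a6, a5, a4, a3, a2, a1, a0] (some 0) (some 8) = [a31, a30, a29, a28, a27, a26, a25, a24] := rfl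

lemma pvSlice32_2 (a31 a30 a29 a28 a27 a26 a25 a24 a23 a22 a21 a20 a19 a18 a17 a16 a15 a14 a13 a12 a11 a10 a9 a8 a7 a6 a5 a4 a3 a2 a1 a0 : Char) :
    PySem.List.slice [a31, a30, a29, a28, a27, a26, a25, a24, a23, a22, a21, a20, a19, a18, a17, a16, a15, a14, a13, a12, a11, a10, a9, a8, a7, a6, a5, a4, a3, a2, a1, a0] (some 8) (some 16) = [a23, a22, a21, a20, a19, a18, a17, a16] := rfl

lemma pvSlice32_3 (a31 a30 a29 a28 a27 a26 a25 a24 a23 a22 a21 a20 a19 a18 a17 a16 a15 a14 a13 a12 a11 a10 a9 a8 a7 a6 a5 a4 a3 a2 a1 a0 : Char) :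
    PySem.List.slice [a31, a30, a29, a28, a27, a26, a25, a24, a23, a22, a21, a20, a19, a18, a17, a16, a15, a14, a13, a12, a11, a10, a9, a8, a7, a6, a5, a4, a3, a2, a1, a0] (some 16) (some 24) = [a15, a14, a13, a12, a11, a10, a9, a8] := rfl

lemma pvSlice32_4 (a31 a30 a29 a28 a27 a26 a25 a24 a23 a22 a21 a20 a19 a18 a17 a16 a15 a14 a13 a12 a11 a10 a9 a8 a7 a6 a5 a4 a3 a2 a1 a0 : Char) :
    PySem.List.slice [a31, a30, a29, a28, a27, a26, a25, a24, a23, a22, a21, a20, a19, a18, a17, a16, a15, a14, a13, a12, a11, a10, a9, a8, a7, a6, a5, a4, a3, a2, a1, a0] (some 24) (some 32) = [a7, a6, a5, a4, a3, a2, a1, a0] := rfl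

lemma pvDiv (q r m : Int) (hm : 0 < m) (h0 : 0 ≤ r) (h1 : r < m) :
    (q * m + r) / m = q := by
  rw [add_comm, Int.add_mul_ediv_right _ _ (ne_of_gt hm), Int.ediv_eq_zero_of_lt h0 h1, zero_add]

lemma pvMod (q r : Int) (h0 : 0 ≤ r) (h1 : r < 256) : (q * 256 + r) % 256 = r := by
  omega

set_option maxHeartbeats 8000000 in
lemma pvByte1 (b31 : Bool) (y30 : Int) (y29 : Int) (hy30 : y30 = 0 ∨ y30 = 1) (hy29 : y29 = 0 ∨ y29 = 1) :
    (PySem.Int.ofCharsBase? [(if b31 then '1' else '0'), (if y30 = 1 then '1' else '0'), (if y29 = 1 then '1' else '0'), '0', '0', '0', '0', '0'] 2).getD 0 = (if b31 then (1:Int) else 0) * 128 + y30 * 64 + y29 * 32 := by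
  cases b31 <;> rcases hy30 with rfl | rfl <;> rcases hy29 with rfl | rfl <;> decide

set_option maxHeartbeats 8000000 in
lemma pvByte2 (b23 : Bool) (b22 : Bool) (b16 : Bool) (w0 : Int) (w1 : Int) (w2 : Int) (w3 : Int) (hw0 : w0 = 0 ∨ w0 = 1) (hw1 : w1 = 0 ∨ w1 = 1) (hw2 : w2 = 0 ∨ w2 = 1) (hw3 : w3 = 0 ∨ w3 = 1) :
    (PySem.Int.ofCharsBase? [(if b23 then '1' else '0'), (if b22 then '1' else '0'), '0', (if w0 = 1 then '1' else '0'), (if w1 = 1 then '1' else '0'), (if w2 = 1 then '1' else '0'), (if w3 = 1 then '1' else '0'), (if b16 then '1' else '0')] 2).getD 0 = (if b23 then (1:Int) else 0) * 128 + (if b22 then (1:Int) else 0) * 64 + w0 * 16 + w1 * 8 + w2 * 4 + w3 * 2 + (if b16 then (1:Int) else 0) * 1 := by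
  cases b23 <;> cases b22 <;> cases b16 <;> rcases hw0 with rfl | rfl <;> rcases hw1 with rfl | rfl <;> rcases hw2 with rfl | rfl <;> rcases hw3 with rfl | rfl <;> decide

set_option maxHeartbeats 8000000 in
lemma pvByte3 (b15 : Bool) (b14 : Bool) (b13 : Bool) (b12 : Bool) (b11 : Bool) (b10 : Bool) (b9 : Bool) (b8 : Bool)   :
    (PySem.Int.ofCharsBase? [(if b15 then '1' else '0'), (if b14 then '1' else '0'), (if b13 then '1' else '0'), (if b12 then '1' else '0'), (if b11 then '1' else '0'), (if b10 then '1' else '0'), (if b9 then '1' else '0'), (if b8 then '1' else '0')] 2).getD 0 = (if b15 then (1:Int) else 0) * 128 + (if b14 then (1:Int) else 0) * 64 + (if b13 then (1:Int) else 0) * 32 + (if b12 then (1:Int) else 0) * 16 + (if b11 then (1:Int) else 0) * 8 + (if b10 then (1:Int) else 0) * 4 + (if b9 then (1:Int) else 0) * 2 + (if b8 then (1:Int) else 0) * 1 := by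
  cases b15 <;> cases b14 <;> cases b13 <;> cases b12 <;> cases b11 <;> cases b10 <;> cases b9 <;> cases b8 <;> decide

set_option maxHeartbeats 8000000 in
lemma pvByte4 (b7 : Bool) (b6 : Bool) (b5 : Bool) (b4 : Bool) (b3 : Bool) (b1 : Bool)   :
    (PySem.Int.ofCharsBase? [(if b7 then '1' else '0'), (if b6 then '1' else '0'), (if b5 then '1' else '0'), (if b4 then '1' else '0'), (if b3 then '1' else '0'), '0', (if b1 then '1' else '0'), '0'] 2).getD 0 = (if b7 then (1:Int) else 0) * 128 + (if b6 then (1:Int) else 0) * 64 + (if b5 then (1:Int) else 0) * 32 + (if b4 then (1:Int) else 0) * 16 + (if b3 then (1:Int) else 0) * 8 + (if b1 then (1:Int) else 0) * 2 := by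
  cases b7 <;> cases b6 <;> cases b5 <;> cases b4 <;> cases b3 <;> cases b1 <;> decide

-- ===== VERDICT (by name: the statement is the Claim_ definition above) =====
set_option maxHeartbeats 2000000 in
theorem cfr1_bytes_spec : Claim_equal_cfr1_bytes := by
  intro RAM_Enable RAM_Mode Inverse_Sinc_Filter_Enable Internal_Profile Sin Manual_OSK_External_Control Autoclear_Digital_Ramp_Accumulator Autoclear_Phase_Accumulator Clear_Digital_Ramp_Accumulator Clear_Phase_Accumulator Load_LRR_At_IO_Update Load_ARR_At_IO_Update OSK_Enable REF_CLK_Input_Power_Down DAC_Power_Down Select_Auto_OSK Digital_Power_Down Aux_DAC_Power_Down External_Power_Down_Control SDIO_Input_Only hDom hPre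
  obtain ⟨hl2, hb0, hb1, hl4, hq0, hq1, hq2, hq3⟩ := hPre
  obtain ⟨c0, c1, tR, hR⟩ : ∃ c0 c1 t, RAM_Mode.toList = c0 :: c1 :: t := by
    match hh : RAM_Mode.toList with
    | [] => rw [hh] at hl2; simp at hl2
    | [c] => rw [hh] at hl2; simp at hl2
    | c0 :: c1 :: t => exact ⟨c0, c1, t, rfl⟩
  obtain ⟨d0, d1, d2, d3, u, hP⟩ :
      ∃ d0 d1 d2 d3 u, Internal_Profile.toList = d0 :: d1 :: d2 :: d3 :: u := by
    match hh : Internal_Profile.toList with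
    | [] => rw [hh] at hl4; simp at hl4
    | [c] => rw [hh] at hl4; simp at hl4
    | [c, c'] => rw [hh] at hl4; simp at hl4
    | [c, c', c''] => rw [hh] at hl4; simp at hl4
    | d0 :: d1 :: d2 :: d3 :: u => exact ⟨d0, d1, d2, d3, u, rfl⟩
  rw [hR] at hb0 hb1
  rw [hP] at hq0 hq1 hq2 hq3
  simp only [List.getD_cons_zero, List.getD_cons_succ] at hb0 hb1 hq0 hq1 hq2 hq3
  have e30 : pvIntAt RAM_Mode 1 = if c1 = '1' then 1 else 0 :=
    pvIntAt_bit _ _ _ (by simp [hR, PySem.List.pyGet?, PySem.List.pyIdx?] <;> rw [if_pos (by omega)] <;> simp) hb1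
  have e29 : pvIntAt RAM_Mode 0 = if c0 = '1' then 1 else 0 :=
    pvIntAt_bit _ _ _ (by simp [hR, PySem.List.pyGet?, PySem.List.pyIdx?] <;> rw [if_pos (by omega)] <;> simp) hb0
  have f0 : pvIntAt Internal_Profile 0 = if d0 = '1' then 1 else 0 :=
    pvIntAt_bit _ _ _ (by simp [hP, PySem.List.pyGet?, PySem.List.pyIdx?] <;> rw [if_pos (by omega)] <;> simp) hq0
  have f1 : pvIntAt Internal_Profile 1 = if d1 = '1' then 1 else 0 :=
    pvIntAt_bit _ _ _ (by simp [hP, PySem.List.pyGet?, PySem.List.pyIdx?] <;> rw [if_pos (by omega)] <;> simp) hq1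
  have f2 : pvIntAt Internal_Profile 2 = if d2 = '1' then 1 else 0 :=
    pvIntAt_bit _ _ _ (by simp [hP, PySem.List.pyGet?, PySem.List.pyIdx?] <;> rw [if_pos (by omega)] <;> simp) hq2
  have f3 : pvIntAt Internal_Profile 3 = if d3 = '1' then 1 else 0 :=
    pvIntAt_bit _ _ _ (by simp [hP, PySem.List.pyGet?, PySem.List.pyIdx?] <;> rw [if_pos (by omega)] <;> simp) hq3
  obtain ⟨y30, hy30b, hy30⟩ :
      ∃ y, (y = 0 ∨ y = 1) ∧ (if c1 = '1' then (1:Int) else 0) = y :=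
    ⟨_, by by_cases h : c1 = '1' <;> simp [h], rfl⟩
  rw [hy30] at e30
  obtain ⟨y29, hy29b, hy29⟩ :
      ∃ y, (y = 0 ∨ y = 1) ∧ (if c0 = '1' then (1:Int) else 0) = y :=
    ⟨_, by by_cases h : c0 = '1' <;> simp [h], rfl⟩
  rw [hy29] at e29
  obtain ⟨w0, hw0b, hw0⟩ :
      ∃ y, (y = 0 ∨ y = 1) ∧ (if d0 = '1' then (1:Int) else 0) = y :=
    ⟨_, by by_cases h : d0 = '1' <;> simp [h], rfl⟩
  rw [hw0] at f0
  obtain ⟨w1, hw1b, hw1⟩ :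
      ∃ y, (y = 0 ∨ y = 1) ∧ (if d1 = '1' then (1:Int) else 0) = y :=
    ⟨_, by by_cases h : d1 = '1' <;> simp [h], rfl⟩
  rw [hw1] at f1
  obtain ⟨w2, hw2b, hw2⟩ :
      ∃ y, (y = 0 ∨ y = 1) ∧ (if d2 = '1' then (1:Int) else 0) = y :=
    ⟨_, by by_cases h : d2 = '1' <;> simp [h], rfl⟩
  rw [hw2] at f2
  obtain ⟨w3, hw3b, hw3⟩ :
      ∃ y, (y = 0 ∨ y = 1) ∧ (if d3 = '1' then (1:Int) else 0) = y :=
    ⟨_, by by_cases h : d3 = '1' <;> simp [h], rfl⟩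
  rw [hw3] at f3
  simp only [Spec_cfr1_bytes, cfr1_bytes, cfr1_bytes_alt]
  rw [PySem.List.slice?_none_none_neg_one]
  simp only [Option.getD_some]
  rw [show (PySem.List.pyRange 0 4 1).map (fun i => pvIntAt Internal_Profile (3 - i)) = [pvIntAt Internal_Profile 3, pvIntAt Internal_Profile 2, pvIntAt Internal_Profile 1, pvIntAt Internal_Profile 0] from rfl]
  rw [show (((((((List.replicate 32 (0:Int)).set 31 (if RAM_Enable then (1:Int) else 0)).set 30 (pvIntAt RAM_Mode 1)).set 29 (pvIntAt RAM_Mode 0)).set 23 (if Manual_OSK_External_Control then (1:Int) else 0)).set 22 (if Inverse_Sinc_Filter_Enable then (1:Int) else 0)).set 21 0) = [(0:Int), (0:Int), (0:Int), (0:Int), (0:Int), (0:Int), (0:Int), (0:Int), (0:Int), (0:Int), (0:Int), (0:Int), (0:Int), (0:Int), (0:Int), (0:Int), (0:Int), (0:Int), (0:Int), (0:Int), (0:Int), 0, (if Inverse_Sinc_Filter_Enable then (1:Int) else 0), (if Manual_OSK_External_Control then (1:Int) else 0), (0:Int), (0:Int), (0:Int), (0:Int), (0:Int), (pvIntAt RAM_Mode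 0), (pvIntAt RAM_Mode 1), (if RAM_Enable then (1:Int) else 0)] from rfl]
  rw [show ([(0:Int), (0:Int), (0:Int), (0:Int), (0:Int), (0:Int), (0:Int), (0:Int), (0:Int), (0:Int), (0:Int), (0:Int), (0:Int), (0:Int), (0:Int), (0:Int), (0:Int), (0:Int), (0:Int), (0:Int), (0:Int), 0, (if Inverse_Sinc_Filter_Enable then (1:Int) else 0), (if Manual_OSK_External_Control then (1:Int) else 0), (0:Int), (0:Int), (0:Int), (0:Int), (0:Int), (pvIntAt RAM_Mode 0), (pvIntAt RAM_Mode 1), (if RAM_Enable then (1:Int) else 0)] : List Int).take 17 ++ [pvIntAt Internal_Profile 3, pvIntAt Internal_Profile 2, pvIntAt Internal_Profile 1, pvIntAt Internal_Profile 0] ++ ([(0:Int), (0:Int), (0:Int), (0:Int), (0:Int), (0:Int), (0:Int), (0:Int), (0:Int), (0:Int), (0:Int), (0:Int), (0:Int), (0:Int), (0:Int), (0:Int), (0:Int), (0:Int), (0:Int), (0:Int), (0:Int), 0, (if Inverse_Sinc_Filter_Enable then (1:Int) else 0), (if Manual_OSK_External_Control then (1:Int) else 0), (0:Int), (0:Int),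 (0:Int), (0:Int), (0:Int), (pvIntAt RAM_Mode 0), (pvIntAt RAM_Mode 1), (if RAM_Enable then (1:Int) else 0)] : List Int).drop 21 = [(0:Int), (0:Int), (0:Int), (0:Int), (0:Int), (0:Int), (0:Int), (0:Int), (0:Int), (0:Int), (0:Int), (0:Int), (0:Int), (0:Int), (0:Int), (0:Int), (0:Int), (pvIntAt Internal_Profile 3), (pvIntAt Internal_Profile 2), (pvIntAt Internal_Profile 1), (pvIntAt Internal_Profile 0), 0, (if Inverse_Sinc_Filter_Enable then (1:Int) else 0), (if Manual_OSK_External_Control then (1:Int) else 0), (0:Int), (0:Int), (0:Int), (0:Int), (0:Int), (pvIntAt RAM_Mode 0), (pvIntAt RAM_Mode 1), (if RAM_Enable then (1:Int) else 0)] from rfl]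
  rw [show ((((((((((((((((((([(0:Int), (0:Int), (0:Int), (0:Int), (0:Int), (0:Int), (0:Int), (0:Int), (0:Int), (0:Int), (0:Int), (0:Int), (0:Int), (0:Int), (0:Int), (0:Int), (0:Int), (pvIntAt Internal_Profile 3), (pvIntAt Internal_Profile 2), (pvIntAt Internal_Profile 1), (pvIntAt Internal_Profile 0), 0, (if Inverse_Sinc_Filter_Enable then (1:Int) else 0), (if Manual_OSK_External_Control then (1:Int) else 0), (0:Int), (0:Int), (0:Int), (0:Int), (0:Int), (pvIntAt RAM_Mode 0), (pvIntAt RAM_Mode 1), (if RAM_Enable then (1:Int) else 0)] : List Int)).set 16 (if Sin then (1:Int) else 0)).set 15 (if Load_LRR_At_IO_Update then (1:Int) else 0)).set 14 (if Autoclear_Digital_Ramp_Accumulator then (1:Int) else 0)).set 13 (if Autoclear_Phase_Accumulator then (1:Int) else 0)).set 12 (if Clear_Digital_Ramp_Accumulator then (1:Int) else 0)).set 11 (if Clear_Phase_Accumulator then (1:Int) else 0)).set 10 (if Load_ARR_At_IO_Update then (1:Int) else 0)).set 9 (if OSK_Enable then (1:Int) else 0)).set 8 (if Select_Auto_OSK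 then (1:Int) else 0)).set 7 (if Digital_Power_Down then (1:Int) else 0)).set 6 (if DAC_Power_Down then (1:Int) else 0)).set 5 (if REF_CLK_Input_Power_Down then (1:Int) else 0)).set 4 (if Aux_DAC_Power_Down then (1:Int) else 0)).set 3 (if External_Power_Down_Control then (1:Int) else 0)).set 2 0).set 1 (if SDIO_Input_Only then (1:Int) else 0)).set 0 0) = [0, (if SDIO_Input_Only then (1:Int) else 0), 0, (if External_Power_Down_Control then (1:Int) else 0), (if Aux_DAC_Power_Down then (1:Int) else 0), (if REF_CLK_Input_Power_Down then (1:Int) else 0), (if DAC_Power_Down then (1:Int) else 0), (if Digital_Power_Down then (1:Int) else 0), (if Select_Auto_OSK then (1:Int) else 0), (if OSK_Enable then (1:Int) else 0), (if Load_ARR_At_IO_Update then (1:Int) else 0), (if Clear_Phase_Accumulator then (1:Int) else 0), (if Clear_Digital_Ramp_Accumulator then (1:Int) else 0), (if Autoclear_Phase_Accumulator then (1:Int) else 0), (if Autoclear_Digital_Ramp_Accumulator then (1:Int) else 0), (if Load_LRR_At_IO_Update then (1:Int) else 0), (if Sin then (1:Int) else 0), (pvIntAt Internal_Profile 3), (pvIntAt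 Internal_Profile 2), (pvIntAt Internal_Profile 1), (pvIntAt Internal_Profile 0), 0, (if Inverse_Sinc_Filter_Enable then (1:Int) else 0), (if Manual_OSK_External_Control then (1:Int) else 0), (0:Int), (0:Int), (0:Int), (0:Int), (0:Int), (pvIntAt RAM_Mode 0), (pvIntAt RAM_Mode 1), (if RAM_Enable then (1:Int) else 0)] from rfl]
  rw [show ([0, (if SDIO_Input_Only then (1:Int) else 0), 0, (if External_Power_Down_Control then (1:Int) else 0), (if Aux_DAC_Power_Down then (1:Int) else 0), (if REF_CLK_Input_Power_Down then (1:Int) else 0), (if DAC_Power_Down then (1:Int) else 0), (if Digital_Power_Down then (1:Int) else 0), (if Select_Auto_OSK then (1:Int) else 0), (if OSK_Enable then (1:Int) else 0), (if Load_ARR_At_IO_Update then (1:Int) else 0), (if Clear_Phase_Accumulator then (1:Int) else 0), (if Clear_Digital_Ramp_Accumulator then (1:Int) else 0), (if Autoclear_Phase_Accumulator then (1:Int) else 0), (if Autoclear_Digital_Ramp_Accumulator then (1:Int) else 0), (if Load_LRR_At_IO_Update then (1:Int) else 0), (if Sin then (1:Int) else 0), (pvIntAt Internal_Profile 3), (pvIntAt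 Internal_Profile 2), (pvIntAt Internal_Profile 1), (pvIntAt Internal_Profile 0), 0, (if Inverse_Sinc_Filter_Enable then (1:Int) else 0), (if Manual_OSK_External_Control then (1:Int) else 0), (0:Int), (0:Int), (0:Int), (0:Int), (0:Int), (pvIntAt RAM_Mode 0), (pvIntAt RAM_Mode 1), (if RAM_Enable then (1:Int) else 0)] : List Int).reverse = [(if RAM_Enable then (1:Int) else 0), (pvIntAt RAM_Mode 1), (pvIntAt RAM_Mode 0), (0:Int), (0:Int), (0:Int), (0:Int), (0:Int), (if Manual_OSK_External_Control then (1:Int) else 0), (if Inverse_Sinc_Filter_Enable then (1:Int) else 0), 0, (pvIntAt Internal_Profile 0), (pvIntAt Internal_Profile 1), (pvIntAt Internal_Profile 2), (pvIntAt Internal_Profile 3), (if Sin then (1:Int) else 0), (if Load_LRR_At_IO_Update then (1:Int) else 0), (if Autoclear_Digital_Ramp_Accumulator then (1:Int) else 0), (if Autoclear_Phase_Accumulator then (1:Int) else 0), (if Clear_Digital_Ramp_Accumulator then (1:Int) else 0), (if Clear_Phase_Accumulator then (1:Int) else 0), (if Load_ARR_At_IO_Update then (1:Int) else 0), (if OSK_Enable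 then (1:Int) else 0), (if Select_Auto_OSK then (1:Int) else 0), (if Digital_Power_Down then (1:Int) else 0), (if DAC_Power_Down then (1:Int) else 0), (if REF_CLK_Input_Power_Down then (1:Int) else 0), (if Aux_DAC_Power_Down then (1:Int) else 0), (if External_Power_Down_Control then (1:Int) else 0), 0, (if SDIO_Input_Only then (1:Int) else 0), 0] from rfl]
  rw [e30, e29, f0, f1, f2, f3]
  simp only [List.map_cons, List.map_nil]
  simp only [pvToStr_if]
  rw [pvToStr_bit y30 hy30b, pvToStr_bit y29 hy29b, pvToStr_bit w0 hw0b, pvToStr_bit w1 hw1b, pvToStr_bit w2 hw2b, pvToStr_bit w3 hw3b]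
  simp only [pvToStr_zero]
  simp only [PySem.Str.toList_slice, PySem.Chars.slice_eq_listSlice]
  rw [pvJoin32]
  rw [pvSlice32_1, pvSlice32_2, pvSlice32_3, pvSlice32_4]
  rw [pvByte1 RAM_Enable y30 y29 hy30b hy29b,
      pvByte2 Manual_OSK_External_Control Inverse_Sinc_Filter_Enable Sin w0 w1 w2 w3 hw0b hw1b hw2b hw3b,
      pvByte3 Load_LRR_At_IO_Update Autoclear_Digital_Ramp_Accumulator Autoclear_Phase_Accumulator Clear_Digital_Ramp_Accumulator Clear_Phase_Accumulator Load_ARR_At_IO_Update OSK_Enable Select_Auto_OSK,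
      pvByte4 Digital_Power_Down DAC_Power_Down REF_CLK_Input_Power_Down Aux_DAC_Power_Down External_Power_Down_Control SDIO_Input_Only]
  obtain ⟨z31, hz31b, hz31⟩ :
      ∃ z, (z = 0 ∨ z = 1) ∧ (if RAM_Enable then (1:Int) else 0) = z :=
    ⟨_, by cases RAM_Enable <;> simp, rfl⟩
  rw [hz31]
  obtain ⟨z23, hz23b, hz23⟩ :
      ∃ z, (z = 0 ∨ z = 1) ∧ (if Manual_OSK_External_Control then (1:Int) else 0) = z :=
    ⟨_, by cases Manual_OSK_External_Control <;> simp, rfl⟩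
  rw [hz23]
  obtain ⟨z22, hz22b, hz22⟩ :
      ∃ z, (z = 0 ∨ z = 1) ∧ (if Inverse_Sinc_Filter_Enable then (1:Int) else 0) = z :=
    ⟨_, by cases Inverse_Sinc_Filter_Enable <;> simp, rfl⟩
  rw [hz22]
  obtain ⟨z16, hz16b, hz16⟩ :
      ∃ z, (z = 0 ∨ z = 1) ∧ (if Sin then (1:Int) else 0) = z :=
    ⟨_, by cases Sin <;> simp, rfl⟩
  rw [hz16]
  obtain ⟨z15, hz15b, hz15⟩ :
      ∃ z, (z = 0 ∨ z = 1) ∧ (if Load_LRR_At_IO_Update then (1:Int) else 0) = z :=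
    ⟨_, by cases Load_LRR_At_IO_Update <;> simp, rfl⟩
  rw [hz15]
  obtain ⟨z14, hz14b, hz14⟩ :
      ∃ z, (z = 0 ∨ z = 1) ∧ (if Autoclear_Digital_Ramp_Accumulator then (1:Int) else 0) = z :=
    ⟨_, by cases Autoclear_Digital_Ramp_Accumulator <;> simp, rfl⟩
  rw [hz14]
  obtain ⟨z13, hz13b, hz13⟩ :
      ∃ z, (z = 0 ∨ z = 1) ∧ (if Autoclear_Phase_Accumulator then (1:Int) else 0) = z :=
    ⟨_, by cases Autoclear_Phase_Accumulator <;> simp, rfl⟩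
  rw [hz13]
  obtain ⟨z12, hz12b, hz12⟩ :
      ∃ z, (z = 0 ∨ z = 1) ∧ (if Clear_Digital_Ramp_Accumulator then (1:Int) else 0) = z :=
    ⟨_, by cases Clear_Digital_Ramp_Accumulator <;> simp, rfl⟩
  rw [hz12]
  obtain ⟨z11, hz11b, hz11⟩ :
      ∃ z, (z = 0 ∨ z = 1) ∧ (if Clear_Phase_Accumulator then (1:Int) else 0) = z :=
    ⟨_, by cases Clear_Phase_Accumulator <;> simp, rfl⟩
  rw [hz11]
  obtain ⟨z10, hz10b, hz10⟩ :
      ∃ z, (z = 0 ∨ z = 1) ∧ (if Load_ARR_At_IO_Update then (1:Int) else 0) = z :=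
    ⟨_, by cases Load_ARR_At_IO_Update <;> simp, rfl⟩
  rw [hz10]
  obtain ⟨z9, hz9b, hz9⟩ :
      ∃ z, (z = 0 ∨ z = 1) ∧ (if OSK_Enable then (1:Int) else 0) = z :=
    ⟨_, by cases OSK_Enable <;> simp, rfl⟩
  rw [hz9]
  obtain ⟨z8, hz8b, hz8⟩ :
      ∃ z, (z = 0 ∨ z = 1) ∧ (if Select_Auto_OSK then (1:Int) else 0) = z :=
    ⟨_, by cases Select_Auto_OSK <;> simp, rfl⟩
  rw [hz8]
  obtain ⟨z7, hz7b, hz7⟩ :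
      ∃ z, (z = 0 ∨ z = 1) ∧ (if Digital_Power_Down then (1:Int) else 0) = z :=
    ⟨_, by cases Digital_Power_Down <;> simp, rfl⟩
  rw [hz7]
  obtain ⟨z6, hz6b, hz6⟩ :
      ∃ z, (z = 0 ∨ z = 1) ∧ (if DAC_Power_Down then (1:Int) else 0) = z :=
    ⟨_, by cases DAC_Power_Down <;> simp, rfl⟩
  rw [hz6]
  obtain ⟨z5, hz5b, hz5⟩ :
      ∃ z, (z = 0 ∨ z = 1) ∧ (if REF_CLK_Input_Power_Down then (1:Int) else 0) = z :=
    ⟨_, by cases REF_CLK_Input_Power_Down <;> simp, rfl⟩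
  rw [hz5]
  obtain ⟨z4, hz4b, hz4⟩ :
      ∃ z, (z = 0 ∨ z = 1) ∧ (if Aux_DAC_Power_Down then (1:Int) else 0) = z :=
    ⟨_, by cases Aux_DAC_Power_Down <;> simp, rfl⟩
  rw [hz4]
  obtain ⟨z3, hz3b, hz3⟩ :
      ∃ z, (z = 0 ∨ z = 1) ∧ (if External_Power_Down_Control then (1:Int) else 0) = z :=
    ⟨_, by cases External_Power_Down_Control <;> simp, rfl⟩
  rw [hz3]
  obtain ⟨z1, hz1b, hz1⟩ :
      ∃ z, (z = 0 ∨ z = 1) ∧ (if SDIO_Input_Only then (1:Int) else 0) = z :=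
    ⟨_, by cases SDIO_Input_Only <;> simp, rfl⟩
  rw [hz1]
  have y30r : 0 ≤ y30 ∧ y30 ≤ 1 := by rcases hy30b with rfl | rfl <;> norm_num
  have y29r : 0 ≤ y29 ∧ y29 ≤ 1 := by rcases hy29b with rfl | rfl <;> norm_num
  have w0r : 0 ≤ w0 ∧ w0 ≤ 1 := by rcases hw0b with rfl | rfl <;> norm_num
  have w1r : 0 ≤ w1 ∧ w1 ≤ 1 := by rcases hw1b with rfl | rfl <;> norm_num
  have w2r : 0 ≤ w2 ∧ w2 ≤ 1 := by rcases hw2b with rfl | rfl <;> norm_num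
  have w3r : 0 ≤ w3 ∧ w3 ≤ 1 := by rcases hw3b with rfl | rfl <;> norm_num
  have z31r : 0 ≤ z31 ∧ z31 ≤ 1 := by rcases hz31b with rfl | rfl <;> norm_num
  have z23r : 0 ≤ z23 ∧ z23 ≤ 1 := by rcases hz23b with rfl | rfl <;> norm_num
  have z22r : 0 ≤ z22 ∧ z22 ≤ 1 := by rcases hz22b with rfl | rfl <;> norm_num
  have z16r : 0 ≤ z16 ∧ z16 ≤ 1 := by rcases hz16b with rfl | rfl <;> norm_num
  have z15r : 0 ≤ z15 ∧ z15 ≤ 1 := by rcases hz15b with rfl | rfl <;> norm_num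
  have z14r : 0 ≤ z14 ∧ z14 ≤ 1 := by rcases hz14b with rfl | rfl <;> norm_num
  have z13r : 0 ≤ z13 ∧ z13 ≤ 1 := by rcases hz13b with rfl | rfl <;> norm_num
  have z12r : 0 ≤ z12 ∧ z12 ≤ 1 := by rcases hz12b with rfl | rfl <;> norm_num
  have z11r : 0 ≤ z11 ∧ z11 ≤ 1 := by rcases hz11b with rfl | rfl <;> norm_num
  have z10r : 0 ≤ z10 ∧ z10 ≤ 1 := by rcases hz10b with rfl | rfl <;> norm_num
  have z9r : 0 ≤ z9 ∧ z9 ≤ 1 := by rcases hz9b with rfl | rfl <;> norm_num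
  have z8r : 0 ≤ z8 ∧ z8 ≤ 1 := by rcases hz8b with rfl | rfl <;> norm_num
  have z7r : 0 ≤ z7 ∧ z7 ≤ 1 := by rcases hz7b with rfl | rfl <;> norm_num
  have z6r : 0 ≤ z6 ∧ z6 ≤ 1 := by rcases hz6b with rfl | rfl <;> norm_num
  have z5r : 0 ≤ z5 ∧ z5 ≤ 1 := by rcases hz5b with rfl | rfl <;> norm_num
  have z4r : 0 ≤ z4 ∧ z4 ≤ 1 := by rcases hz4b with rfl | rfl <;> norm_num
  have z3r : 0 ≤ z3 ∧ z3 ≤ 1 := by rcases hz3b with rfl | rfl <;> norm_num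
  have z1r : 0 ≤ z1 ∧ z1 ≤ 1 := by rcases hz1b with rfl | rfl <;> norm_num
  clear hy30b hy29b hw0b hw1b hw2b hw3b hz31b hz23b hz22b hz16b hz15b hz14b hz13b hz12b hz11b hz10b hz9b hz8b hz7b hz6b hz5b hz4b hz3b hz1b
  simp only [show (2:Int) ^ 31 = 2147483648 from by norm_num, show (2:Int) ^ 30 = 1073741824 from by norm_num, show (2:Int) ^ 29 = 536870912 from by norm_num, show (2:Int) ^ 24 = 16777216 from by norm_num, show (2:Int) ^ 23 = 8388608 from by norm_num, show (2:Int) ^ 22 = 4194304 from by norm_num, show (2:Int) ^ 20 = 1048576 from by norm_num, show (2:Int) ^ 19 = 524288 from by norm_num, show (2:Int) ^ 18 = 262144 from by norm_num, show (2:Int) ^ 17 = 131072 from by norm_num, show (2:Int) ^ 16 = 65536 from by norm_num, show (2:Int) ^ 15 = 32768 from by norm_num, show (2:Int) ^ 14 = 16384 from by norm_num, show (2:Int) ^ 13 = 8192 from by norm_num, show (2:Int) ^ 12 = 4096 from by norm_num, show (2:Int) ^ 11 = 2048 from by norm_num, show (2:Int) ^ 10 = 1024 from by norm_num, show (2:Int)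 ^ 9 = 512 from by norm_num, show (2:Int) ^ 8 = 256 from by norm_num, show (2:Int) ^ 7 = 128 from by norm_num, show (2:Int) ^ 6 = 64 from by norm_num, show (2:Int) ^ 5 = 32 from by norm_num, show (2:Int) ^ 4 = 16 from by norm_num, show (2:Int) ^ 3 = 8 from by norm_num, show (2:Int) ^ 1 = 2 from by norm_num]
  rw [PySem.Int.floordiv_eq_ediv_of_pos (by norm_num : (0:Int) < 16777216),
      PySem.Int.floordiv_eq_ediv_of_pos (by norm_num : (0:Int) < 65536),
      PySem.Int.floordiv_eq_ediv_of_pos (by norm_num : (0:Int) < 256)]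
  simp only [PySem.Int.mod_eq_emod_of_pos (by norm_num : (0:Int) < 256)]
  simp only [List.cons.injEq, and_true]
  refine ⟨?_, ?_, ?_, ?_⟩
  · rw [show z31 * 2147483648 + y30 * 1073741824 + y29 * 536870912 + z23 * 8388608 + z22 * 4194304 + w0 * 1048576 + w1 * 524288 + w2 * 262144 + w3 * 131072 + z16 * 65536 + z15 * 32768 + z14 * 16384 + z13 * 8192 + z12 * 4096 + z11 * 2048 + z10 * 1024 + z9 * 512 + z8 * 256 + z7 * 128 + z6 * 64 + z5 * 32 + z4 * 16 + z3 * 8 + z1 * 2 = (z31 * 128 + y30 * 64 + y29 * 32) * 16777216 + (z23 * 8388608 + z22 * 4194304 + w0 * 1048576 + w1 * 524288 + w2 * 262144 + w3 * 131072 + z16 * 65536 + z15 * 32768 + z14 * 16384 + z13 * 8192 + z12 * 4096 + z11 * 2048 + z10 * 1024 + z9 * 512 + z8 * 256 + z7 * 128 + z6 * 64 + z5 * 32 + z4 * 16 + z3 * 8 + z1 * 2) from by ring,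
        pvDiv (z31 * 128 + y30 * 64 + y29 * 32) (z23 * 8388608 + z22 * 4194304 + w0 * 1048576 + w1 * 524288 + w2 * 262144 + w3 * 131072 + z16 * 65536 + z15 * 32768 + z14 * 16384 + z13 * 8192 + z12 * 4096 + z11 * 2048 + z10 * 1024 + z9 * 512 + z8 * 256 + z7 * 128 + z6 * 64 + z5 * 32 + z4 * 16 + z3 * 8 + z1 * 2) 16777216 (by norm_num) (by omega) (by omega),
        Int.emod_eq_of_lt (by omega) (by omega)]
  · rw [show z31 * 2147483648 + y30 * 1073741824 + y29 * 536870912 + z23 * 8388608 + z22 * 4194304 + w0 * 1048576 + w1 * 524288 + w2 * 262144 + w3 * 131072 + z16 * 65536 + z15 * 32768 + z14 * 16384 + z13 * 8192 + z12 * 4096 + z11 * 2048 + z10 * 1024 + z9 * 512 + z8 * 256 + z7 * 128 + z6 * 64 + z5 * 32 + z4 * 16 + z3 * 8 + z1 * 2 = (z31 * 32768 + y30 * 16384 + y29 * 8192 + z23 * 128 + z22 * 64 + w0 * 16 + w1 * 8 + w2 * 4 + w3 * 2 + z16 * 1) * 65536 + (z15 * 32768 + z14 * 16384 + z13 * 8192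 + z12 * 4096 + z11 * 2048 + z10 * 1024 + z9 * 512 + z8 * 256 + z7 * 128 + z6 * 64 + z5 * 32 + z4 * 16 + z3 * 8 + z1 * 2) from by ring,
        pvDiv (z31 * 32768 + y30 * 16384 + y29 * 8192 + z23 * 128 + z22 * 64 + w0 * 16 + w1 * 8 + w2 * 4 + w3 * 2 + z16 * 1) (z15 * 32768 + z14 * 16384 + z13 * 8192 + z12 * 4096 + z11 * 2048 + z10 * 1024 + z9 * 512 + z8 * 256 + z7 * 128 + z6 * 64 + z5 * 32 + z4 * 16 + z3 * 8 + z1 * 2) 65536 (by norm_num) (by omega) (by omega),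
        show (z31 * 32768 + y30 * 16384 + y29 * 8192 + z23 * 128 + z22 * 64 + w0 * 16 + w1 * 8 + w2 * 4 + w3 * 2 + z16 * 1) = (z31 * 128 + y30 * 64 + y29 * 32) * 256 + (z23 * 128 + z22 * 64 + w0 * 16 + w1 * 8 + w2 * 4 + w3 * 2 + z16 * 1) from by ring,
        pvMod (z31 * 128 + y30 * 64 + y29 * 32) (z23 * 128 + z22 * 64 + w0 * 16 + w1 * 8 + w2 * 4 + w3 * 2 + z16 * 1) (by omega) (by omega)]
  · rw [show z31 * 2147483648 + y30 * 1073741824 + y29 * 536870912 + z23 * 8388608 + z22 * 4194304 + w0 * 1048576 + w1 * 524288 + w2 * 262144 + w3 * 131072 + z16 * 65536 + z15 * 32768 + z14 * 16384 + z13 * 8192 + z12 * 4096 + z11 * 2048 + z10 * 1024 + z9 * 512 + z8 * 256 + z7 * 128 + z6 * 64 + z5 * 32 + z4 * 16 + z3 * 8 + z1 * 2 = (z31 * 8388608 + y30 * 4194304 + y29 * 2097152 + z23 * 32768 + z22 * 16384 + w0 * 4096 + w1 * 2048 + w2 * 1024 + w3 * 512 + z16 * 256 + z15 * 128 + z14 *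 64 + z13 * 32 + z12 * 16 + z11 * 8 + z10 * 4 + z9 * 2 + z8 * 1) * 256 + (z7 * 128 + z6 * 64 + z5 * 32 + z4 * 16 + z3 * 8 + z1 * 2) from by ring,
        pvDiv (z31 * 8388608 + y30 * 4194304 + y29 * 2097152 + z23 * 32768 + z22 * 16384 + w0 * 4096 + w1 * 2048 + w2 * 1024 + w3 * 512 + z16 * 256 + z15 * 128 + z14 * 64 + z13 * 32 + z12 * 16 + z11 * 8 + z10 * 4 + z9 * 2 + z8 * 1) (z7 * 128 + z6 * 64 + z5 * 32 + z4 * 16 + z3 * 8 + z1 * 2) 256 (by norm_num) (by omega) (by omega),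
        show (z31 * 8388608 + y30 * 4194304 + y29 * 2097152 + z23 * 32768 + z22 * 16384 + w0 * 4096 + w1 * 2048 + w2 * 1024 + w3 * 512 + z16 * 256 + z15 * 128 + z14 * 64 + z13 * 32 + z12 * 16 + z11 * 8 + z10 * 4 + z9 * 2 + z8 * 1) = (z31 * 32768 + y30 * 16384 + y29 * 8192 + z23 * 128 + z22 * 64 + w0 * 16 + w1 * 8 + w2 * 4 + w3 * 2 + z16 * 1) * 256 + (z15 * 128 + z14 * 64 + z13 * 32 + z12 * 16 + z11 * 8 + z10 * 4 + z9 * 2 + z8 * 1) from by ring,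
        pvMod (z31 * 32768 + y30 * 16384 + y29 * 8192 + z23 * 128 + z22 * 64 + w0 * 16 + w1 * 8 + w2 * 4 + w3 * 2 + z16 * 1) (z15 * 128 + z14 * 64 + z13 * 32 + z12 * 16 + z11 * 8 + z10 * 4 + z9 * 2 + z8 * 1) (by omega) (by omega)]
  · rw [show z31 * 2147483648 + y30 * 1073741824 + y29 * 536870912 + z23 * 8388608 + z22 * 4194304 + w0 * 1048576 + w1 * 524288 + w2 * 262144 + w3 * 131072 + z16 * 65536 + z15 * 32768 + z14 * 16384 + z13 * 8192 + z12 * 4096 + z11 * 2048 + z10 * 1024 + z9 * 512 + z8 * 256 + z7 * 128 + z6 * 64 + z5 * 32 + z4 * 16 + z3 * 8 + z1 * 2 = (z31 * 8388608 + y30 * 4194304 + y29 * 2097152 + z23 * 32768 + z22 * 16384 + w0 * 4096 + w1 * 2048 + w2 * 1024 + w3 * 512 + z16 * 256 + z15 * 128 + z14 * 64 + z13 * 32 + z12 * 16 + z11 * 8 + z10 * 4 + z9 * 2 + z8 * 1) * 256 + (z7 * 128 + z6 * 64 + z5 * 32 + z4 * 16 + z3 * 8 + z1 * 2) from by ring,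
        pvMod (z31 * 8388608 + y30 * 4194304 + y29 * 2097152 + z23 * 32768 + z22 * 16384 + w0 * 4096 + w1 * 2048 + w2 * 1024 + w3 * 512 + z16 * 256 + z15 * 128 + z14 * 64 + z13 * 32 + z12 * 16 + z11 * 8 + z10 * 4 + z9 * 2 + z8 * 1) (z7 * 128 + z6 * 64 + z5 * 32 + z4 * 16 + z3 * 8 + z1 * 2) (by omega) (by omega)]
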